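-- pv_equiv track=rewrite | github.com/Minutenreis/University-Homework | PythonASQ/4/stdFunctions.py | range_control
-- ===== SOURCE A (Python) =====
-- def range_control(start:int, stop:int = None, step:int = 1) -> list[int]:
--     """Returns a list of numbers from start to stop with the given step."""
--     if step == 0:
--         raise ValueError("Step must not be zero")
--     if stop == None:
--         stop = start
--         start = 0
--     if start > stop and step > 0:
--         return []
--     if start < stop and step < 0:
--         return []
--     numbers = []
--     while start < stop and step > 0 or start > stop and step < 0:
--         numbers.append(start)
--         start += step
--     return numbers
-- ===== SOURCE B (Python) =====
-- def range_control(start: int, stop: int = None, step: int = 1) -> list[int]: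
--     """Returns a list of numbers from start to stop with the given step."""
--     if step == 0:
--         raise ValueError("Step must not be zero")
--     if stop is None:
--         stop, start = start, 0
--     n = max(0, -(-(stop - start) // step))
--     return [start + i * step for i in range(n)]
-- ===== Notes on version B (the rewrite author's own statement) =====
-- stated objective: alternative
-- what changed: Replaces the increment-and-test while loop (with its repeated list.append) by a closed-form ceil-division element count and a single index-based list comprehension; Pre_ excludes step == 0, where both A and B raise ValueError.
import Mathlib
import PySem

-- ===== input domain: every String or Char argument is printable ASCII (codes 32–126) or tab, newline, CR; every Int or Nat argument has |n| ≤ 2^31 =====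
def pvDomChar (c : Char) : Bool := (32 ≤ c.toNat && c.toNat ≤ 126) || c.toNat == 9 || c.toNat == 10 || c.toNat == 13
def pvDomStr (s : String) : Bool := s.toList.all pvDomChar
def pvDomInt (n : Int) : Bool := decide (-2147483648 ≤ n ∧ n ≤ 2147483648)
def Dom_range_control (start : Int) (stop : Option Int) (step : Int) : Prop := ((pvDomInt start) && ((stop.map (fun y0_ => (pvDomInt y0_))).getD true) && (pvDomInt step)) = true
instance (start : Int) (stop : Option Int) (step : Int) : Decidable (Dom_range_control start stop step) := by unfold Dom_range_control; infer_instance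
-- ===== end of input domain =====

-- B replaces A's increment-and-test while loop by a closed-form ceil-division count and
-- an index-based comprehension; Pre_ excludes step = 0, where the Python A raises ValueError.

-- ===== PORT A =====
-- the while loop of A: while start < stop and step > 0 or start > stop and step < 0: append start; start += step
def rcLoop (stop step : Int) (start : Int) (numbers : List Int) : List Int :=
  if (start < stop ∧ 0 < step) ∨ (stop < start ∧ step < 0) then
    rcLoop stop step (start + step) (numbers ++ [start])
  else numbers
termination_by (if 0 < step then stop - start else start - stop).toNat
decreasing_by
  rename_i h
  split <;> omega

def range_control (start : Int) (stop : Option Int) (step : Int) : List Int :=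
  -- step = 0: Python raises ValueError (excluded by Pre_); the port returns [] there
  if step = 0 then []
  else
    let p : Int × Int := match stop with
      | none => (0, start)          -- stop = start; start = 0
      | some s => (start, s)
    if p.2 < p.1 ∧ 0 < step then []
    else if p.1 < p.2 ∧ step < 0 then []
    else rcLoop p.2 step p.1 []

-- ===== PORT B =====
def range_control_alt (start : Int) (stop : Option Int) (step : Int) : List Int :=
  if step = 0 then []
  else
    let p : Int × Int := match stop with
      | none => (0, start)
      | some s => (start, s)
    let n : Int := max 0 (-(PySem.Int.floordiv (-(p.2 - p.1)) step))
    (List.range n.toNat).map (fun (i : Nat) => p.1 + (i : Int) * step)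

-- ===== PRECONDITION & SPEC =====
-- Pre_ excludes exactly step = 0, on which the Python A raises ValueError
def Pre_range_control (start : Int) (stop : Option Int) (step : Int) : Prop := step ≠ 0
instance (start : Int) (stop : Option Int) (step : Int) : Decidable (Pre_range_control start stop step) := by unfold Pre_range_control; infer_instance
def pvWitness_range_control : Int × Option Int × Int := (1, some 7, 2)

def Spec_range_control (start : Int) (stop : Option Int) (step : Int) (out : List Int) : Prop := out = range_control_alt start stop step
instance (start : Int) (stop : Option Int) (step : Int) (out : List Int) : Decidable (Spec_range_control start stop step out) := by unfold Spec_range_control; infer_instance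

-- ===== CLAIM (what is proved, stated in full; the proofs are below) =====
def Claim_equal_range_control : Prop := ∀ (start : Int) (stop : Option Int) (step : Int), Dom_range_control start stop step → Pre_range_control start stop step → Spec_range_control start stop step (range_control start stop step)

-- ===== LEMMAS AND PROOFS =====

-- the closed-form count: ceil((stop-start)/step) = -((-(stop-start)) // step)
def rcCount (d step : Int) : Int := -(PySem.Int.floordiv (-d) step)

theorem rcCount_eq_iff_of_pos {d s q : Int} (hs : 0 < s) :
    rcCount d s = q ↔ (q - 1) * s < d ∧ d ≤ q * s := by
  unfold rcCount
  exact PySem.Int.neg_floordiv_neg_eq_iff_of_pos hs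

theorem rcCount_neg_neg (d s : Int) : rcCount d s = rcCount (-d) (-s) := by
  unfold rcCount
  rw [show PySem.Int.floordiv (-d) s = PySem.Int.floordiv d (-s) from
    (PySem.Int.floordiv_neg_neg d (-s)).symm ▸ (by rw [neg_neg]), neg_neg]

theorem rcCount_succ {d s : Int} (hs : s ≠ 0) : rcCount d s = rcCount (d - s) s + 1 := by
  rcases lt_or_gt_of_ne hs with hneg | hpos
  · rw [rcCount_neg_neg d s, rcCount_neg_neg (d - s) s,
      show -(d - s) = -d - -s from by ring]
    have hp : 0 < -s := by omega
    have h' := (rcCount_eq_iff_of_pos (d := -d - -s) hp (q := rcCount (-d - -s) (-s))).mp rfl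
    rw [rcCount_eq_iff_of_pos hp]
    constructor <;> nlinarith [h'.1, h'.2]
  · have h' := (rcCount_eq_iff_of_pos (d := d - s) hpos (q := rcCount (d - s) s)).mp rfl
    rw [rcCount_eq_iff_of_pos hpos]
    constructor <;> nlinarith [h'.1, h'.2]

theorem rcCount_nonpos {d s : Int} (hs : s ≠ 0)
    (h : ¬ ((0 < d ∧ 0 < s) ∨ (d < 0 ∧ s < 0))) : rcCount d s ≤ 0 := by
  rcases lt_or_gt_of_ne hs with hneg | hpos
  · have hd : 0 ≤ d := by omega
    rw [rcCount_neg_neg]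
    unfold rcCount
    have := (PySem.Int.le_floordiv_iff_mul_le (a := -(-d)) (b := -s) (q := 0) (by omega)).mpr
      (by omega)
    omega
  · have hd : d ≤ 0 := by omega
    unfold rcCount
    have := (PySem.Int.le_floordiv_iff_mul_le (a := -d) (b := s) (q := 0) hpos).mpr (by omega)
    omega

theorem rcCount_pos {d s : Int} (h : (0 < d ∧ 0 < s) ∨ (d < 0 ∧ s < 0)) : 0 < rcCount d s := by
  rcases h with ⟨hd, hs⟩ | ⟨hd, hs⟩
  · unfold rcCount
    have := (PySem.Int.floordiv_lt_iff_lt_mul (a := -d) (b := s) (q := 0) hs).mpr (by omega)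
    omega
  · rw [rcCount_neg_neg]
    unfold rcCount
    have := (PySem.Int.floordiv_lt_iff_lt_mul (a := -(-d)) (b := -s) (q := 0) (by omega)).mpr
      (by omega)
    omega

theorem rcLoop_eq (stop step : Int) (hs : step ≠ 0) :
    ∀ (start : Int) (acc : List Int),
      rcLoop stop step start acc =
        acc ++ (List.range (max 0 (rcCount (stop - start) step)).toNat).map
          (fun (i : Nat) => start + (i : Int) * step) := by
  intro start acc
  fun_induction rcLoop stop step start acc with
  | case1 start acc hcond ih =>
    have hn : 0 < rcCount (stop - start) step := rcCount_pos (by omega)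
    have hsucc : rcCount (stop - start) step = rcCount (stop - (start + step)) step + 1 := by
      have h := rcCount_succ (d := stop - start) hs
      rwa [show stop - start - step = stop - (start + step) from by ring] at h
    have e1 : (max 0 (rcCount (stop - start) step)).toNat
        = (max 0 (rcCount (stop - (start + step)) step)).toNat + 1 := by omega
    rw [ih, e1, List.range_succ_eq_map, List.map_cons, List.map_map]
    simp only [List.append_assoc, List.singleton_append, Nat.cast_zero, zero_mul, add_zero]
    congr 1
    congr 1
    apply List.map_congr_left
    intro i _
    simp only [Function.comp_apply]
    push_cast
    ring
  | case2 start acc hcond =>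
    have hle : rcCount (stop - start) step ≤ 0 := rcCount_nonpos hs (by omega)
    have : (max 0 (rcCount (stop - start) step)).toNat = 0 := by omega
    simp [this]

theorem range_control_spec : Claim_equal_range_control := by
  intro start stop step _ hpre
  unfold Pre_range_control at hpre
  have key : ∀ a b : Int,
      (if b < a ∧ 0 < step then []
       else if a < b ∧ step < 0 then [] else rcLoop b step a [])
      = (List.range (max 0 (rcCount (b - a) step)).toNat).map
          (fun (i : Nat) => a + (i : Int) * step) := by
    intro a b
    split_ifs with h1 h2
    · have hle : rcCount (b - a) step ≤ 0 := rcCount_nonpos hpre (by omega)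
      have hz : (max 0 (rcCount (b - a) step)).toNat = 0 := by omega
      rw [hz]
      simp
    · have hle : rcCount (b - a) step ≤ 0 := rcCount_nonpos hpre (by omega)
      have hz : (max 0 (rcCount (b - a) step)).toNat = 0 := by omega
      rw [hz]
      simp
    · rw [rcLoop_eq b step hpre a []]
      simp
  unfold Spec_range_control range_control range_control_alt
  rw [if_neg hpre, if_neg hpre]
  cases stop with
  | none => exact key 0 start
  | some s => exact key start s
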